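-- pv_equiv track=rewrite | github.com/alexzav2006/AlexadnrZav | ПР 8.py | mag_kv
-- ===== SOURCE A (Python) =====
-- def mag_kv(matrix):
--     summa = sum(matrix[0])
--     for i in range(len(matrix)):
--         kolv = 0
--         for j in range(len(matrix)):
--             kolv += matrix[j][i]
--         if kolv != summa or sum(matrix[i]) != summa:
--             return False
--     return True
-- ===== SOURCE B (Python) =====
-- def mag_kv(matrix):
--     n = len(matrix)
--     target = sum(matrix[0])
--     def ok(i):
--         if i >= n:
--             return True
--         return sum(matrix[i]) == target and sum(row[i] for row in matrix) == target and ok(i + 1)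
--     return ok(0)
-- ===== Notes on version B (the rewrite author's own statement) =====
-- stated objective: alternative
-- what changed: A's fused index loop with an accumulator-based column sum and an early 'return False' is replaced by a recursion over the index whose per-step check is an and-chain that tests the row sum first and sums each column directly over the rows with sum(row[i] for row in matrix).
import Mathlib
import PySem

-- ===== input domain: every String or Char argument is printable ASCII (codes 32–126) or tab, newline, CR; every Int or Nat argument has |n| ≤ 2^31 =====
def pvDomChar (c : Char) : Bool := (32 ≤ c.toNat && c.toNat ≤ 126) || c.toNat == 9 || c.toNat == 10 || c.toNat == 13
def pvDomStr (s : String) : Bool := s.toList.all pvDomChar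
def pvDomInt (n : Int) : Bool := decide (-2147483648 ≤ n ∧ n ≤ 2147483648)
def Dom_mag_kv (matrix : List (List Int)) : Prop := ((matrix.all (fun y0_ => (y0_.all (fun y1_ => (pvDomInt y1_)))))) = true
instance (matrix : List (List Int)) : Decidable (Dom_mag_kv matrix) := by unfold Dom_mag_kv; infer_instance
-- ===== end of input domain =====

-- B replaces A's fused index loop with early 'return False' by a recursion over the index
-- that checks the row sum first and sums each column directly over the rows; objective: alternative decomposition.

-- ===== PORT A =====
-- A's for-loop with early 'return False': structural recursion over the index list.
def magA_go (matrix : List (List Int)) (summa : Int) (n : Nat) : List Nat → Bool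
  | [] => true
  | i :: rest =>
    let kolv := (List.range n).foldl
      (fun s (j : Nat) => s + PySem.List.pyGetD (PySem.List.pyGetD matrix (j : Int) []) (i : Int) 0) 0
    if kolv ≠ summa ∨ (PySem.List.pyGetD matrix (i : Int) []).sum ≠ summa then false
    else magA_go matrix summa n rest

def mag_kv (matrix : List (List Int)) : Bool :=
  let summa := (PySem.List.pyGetD matrix 0 []).sum
  magA_go matrix summa matrix.length (List.range matrix.length)

-- ===== PORT B =====
-- B's recursive helper ok(i): row i and column i both sum to target, then recurse on i+1.
def magB_ok (matrix : List (List Int)) (target : Int) (n : Nat) (i : Nat) : Bool :=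
  if n ≤ i then true
  else
    ((PySem.List.pyGetD matrix (i : Int) []).sum == target)
    && ((matrix.map (fun row => PySem.List.pyGetD row (i : Int) 0)).sum == target)
    && magB_ok matrix target n (i + 1)
termination_by n - i
decreasing_by omega

def mag_kv_alt (matrix : List (List Int)) : Bool :=
  magB_ok matrix ((PySem.List.pyGetD matrix 0 []).sum) matrix.length 0

-- ===== PRECONDITION & SPEC =====
-- Pre_ is exactly where Python A returns normally (no IndexError): the matrix is nonempty, and
-- either no row is shorter than the number of rows, or some fully-present column (or its row)
-- fails the first row's sum, so A returns False before ever reaching a missing entry.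
def Pre_mag_kv (matrix : List (List Int)) : Prop :=
  matrix ≠ [] ∧
  ((∀ row ∈ matrix, matrix.length ≤ row.length) ∨
   ∃ i ∈ List.range matrix.length,
     (∀ row ∈ matrix, i < row.length) ∧
     ((matrix.map (fun row => row.getD i 0)).sum ≠ (matrix.headD []).sum ∨
      (matrix.getD i []).sum ≠ (matrix.headD []).sum))
instance (matrix : List (List Int)) : Decidable (Pre_mag_kv matrix) := by
  unfold Pre_mag_kv; infer_instance

def pvWitness_mag_kv : List (List Int) := [[2, 7, 6], [9, 5, 1], [4, 3, 8]]

def Spec_mag_kv (matrix : List (List Int)) (out : Bool) : Prop := out = mag_kv_alt matrix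
instance (matrix : List (List Int)) (out : Bool) : Decidable (Spec_mag_kv matrix out) := by
  unfold Spec_mag_kv; infer_instance

-- ===== CLAIM (what is proved, stated in full; the proofs are below) =====
def Claim_equal_mag_kv : Prop :=
  ∀ (matrix : List (List Int)), Dom_mag_kv matrix → Pre_mag_kv matrix →
    Spec_mag_kv matrix (mag_kv matrix)

-- ===== LEMMAS AND PROOFS =====

-- A's early-exit recursion equals List.all of the per-index check.
theorem magA_go_eq_all (matrix : List (List Int)) (summa : Int) (n : Nat) :
    ∀ l : List Nat, magA_go matrix summa n l =
      l.all (fun i =>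
        ((List.range n).foldl
          (fun s (j : Nat) => s + PySem.List.pyGetD (PySem.List.pyGetD matrix (j : Int) []) (i : Int) 0) 0
          == summa)
        && ((PySem.List.pyGetD matrix (i : Int) []).sum == summa)) := by
  intro l
  induction l with
  | nil => rfl
  | cons i rest ih =>
    simp only [magA_go]
    split_ifs with h
    · rcases h with h | h <;> simp_all
    · push Not at h
      simp_all

-- B's recursion from index i equals List.all over the remaining indices.
theorem magB_ok_eq_all (matrix : List (List Int)) (target : Int) (n : Nat) :
    ∀ (k : Nat) (i : Nat), n = i + k → magB_ok matrix target n i =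
      (List.range' i k).all (fun i =>
        ((PySem.List.pyGetD matrix (i : Int) []).sum == target)
        && ((matrix.map (fun row => PySem.List.pyGetD row (i : Int) 0)).sum == target)) := by
  intro k
  induction k with
  | zero =>
    intro i hi
    rw [magB_ok, if_pos (by omega)]
    rfl
  | succ k ih =>
    intro i hi
    rw [magB_ok]
    rw [if_neg (by omega)]
    rw [List.range'_succ, List.all_cons, ih (i + 1) (by omega), Bool.and_assoc]

-- A's column-i sum (fold over row indices) equals B's (sum over the rows themselves).
theorem col_eq (matrix : List (List Int)) (i : Nat) :
    (List.range matrix.length).foldl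
      (fun s (j : Nat) => s + PySem.List.pyGetD (PySem.List.pyGetD matrix (j : Int) []) (i : Int) 0) 0
    = (matrix.map (fun row => PySem.List.pyGetD row (i : Int) 0)).sum := by
  rw [PySem.List.foldl_add]
  simp only [zero_add]
  congr 1
  apply List.ext_getElem
  · simp
  · intro k hk _
    have hk' : k < matrix.length := by simpa using hk
    simp [List.getElem?_eq_getElem hk']

-- ===== VERDICT (by name: the statement is the Claim_ definition above) =====
theorem mag_kv_spec : Claim_equal_mag_kv := by
  intro matrix _ _
  unfold Spec_mag_kv mag_kv mag_kv_alt
  rw [magA_go_eq_all, magB_ok_eq_all matrix _ matrix.length matrix.length 0 (by omega),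
      ← List.range_eq_range']
  congr 1
  funext i
  rw [col_eq, Bool.and_comm]
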